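-- pv_equiv track=rewrite | github.com/sarangp323/counting_freq | hackerrank/gaming_arr.py | gamingArray
-- ===== SOURCE A (Python) =====
-- def gamingArray(arr):
--     # Write your code here
-- 	# first way
--     i=0
--     bob=False
--     k=max(arr)
--     k_index=arr.index(k)
--     while(k_index>=0):
--
--         if i%2==0:
--             arr=arr[:k_index]
--
--             if len(arr)==0:
--                 return "BOB"
--             k=max(arr)
--             k_index=arr.index(k)
--         else:
--             arr=arr[:k_index]
--
--             if len(arr)==0:
--                 return "ANDY"
--             k=max(arr)
--             k_index=arr.index(k)
--         i+=1
-- 	#second way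
--     c=0
--     while(len(arr)>0):
--         k=max(arr)
--         k_index=arr.index(k)
--         arr=arr[:k_index]
--         c+=1
--     return "ANDY" if c%2==0 else "BOB"
-- 	#third way
--
--     cnt=0
--     mx=0
--     for i in arr:
--         if i>mx:
--             mx=i
--             cnt+=1
--     return "ANDY" if cnt%2==0 else "BOB"
-- ===== SOURCE B (Python) =====
-- def gamingArray(arr):
--     cnt = 0
--     best = None
--     for x in arr:
--         if best is None or x > best:
--             best = x
--             cnt += 1
--     return "BOB" if cnt % 2 == 1 else "ANDY"
-- ===== Notes on version B (the rewrite author's own statement) =====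
-- stated objective: faster
-- what changed: Replaced the repeated max()+index()+truncate loop with a single left-to-right pass counting prefix maxima and deciding by parity.
-- crash fix: On the empty list A raises ValueError (max of empty sequence); B returns "ANDY" (zero moves, even). — e.g. on gamingArray([]): A raises ValueError, B returns "ANDY"
import Mathlib
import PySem

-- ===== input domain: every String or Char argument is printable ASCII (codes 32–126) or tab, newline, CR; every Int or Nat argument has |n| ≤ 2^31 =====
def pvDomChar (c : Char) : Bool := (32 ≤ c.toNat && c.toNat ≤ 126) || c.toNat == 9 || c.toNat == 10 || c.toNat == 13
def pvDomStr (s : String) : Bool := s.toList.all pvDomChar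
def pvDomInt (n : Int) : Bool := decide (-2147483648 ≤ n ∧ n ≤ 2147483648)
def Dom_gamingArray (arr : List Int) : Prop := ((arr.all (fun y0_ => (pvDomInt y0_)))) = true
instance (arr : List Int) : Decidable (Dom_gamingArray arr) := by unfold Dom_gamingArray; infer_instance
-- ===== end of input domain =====

-- B replaces A's quadratic max/index/truncate loop by one pass counting prefix maxima (parity decides the winner).

-- ===== PORT A =====
-- A's while loop: arr is truncated to arr[:k_index] each iteration (k = max(arr), k_index = arr.index(k));
-- the two parity branches return "BOB"/"ANDY" when the truncation empties the list.
def gamingArrayGo (arr : List Int) (i : Int) : String :=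
  match PySem.List.max? arr (fun y => y) with
  | none => ""          -- max([]) raises ValueError; excluded by Pre_
  | some k =>
    match h2 : PySem.List.index? arr k with
    | none => ""        -- unreachable: k ∈ arr
    | some kidx =>
      let arr' := PySem.List.slice arr none (some (kidx : Int))
      if i % 2 == 0 then
        (if arr'.length = 0 then "BOB" else gamingArrayGo arr' (i + 1))
      else
        (if arr'.length = 0 then "ANDY" else gamingArrayGo arr' (i + 1))
termination_by arr.length
decreasing_by
  all_goals
  · rcases (PySem.List.index?_eq_some_iff _ _ _).mp h2 with ⟨pre, suf, heq, hlen, hnot⟩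
    have hk : kidx < arr.length := by subst heq; simp [← hlen]
    simp only [PySem.List.slice_to_natCast, List.length_take]
    omega

def gamingArray (arr : List Int) : String := gamingArrayGo arr 0

-- ===== PORT B =====
def altStep (p : Int × Option Int) (x : Int) : Int × Option Int :=
  match p.2 with
  | none => (p.1 + 1, some x)
  | some b => if x > b then (p.1 + 1, some x) else p

def gamingArray_alt (arr : List Int) : String :=
  let cnt := (arr.foldl altStep (0, none)).1
  if cnt % 2 == 1 then "BOB" else "ANDY"

-- ===== PRECONDITION & SPEC =====
-- Pre_ excludes only the empty list, on which A raises ValueError (max() of empty sequence).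
def Pre_gamingArray (arr : List Int) : Prop := arr ≠ []
instance (arr : List Int) : Decidable (Pre_gamingArray arr) := by unfold Pre_gamingArray; infer_instance
def pvWitness_gamingArray : List Int := [1]

-- On the empty list A raises ValueError (max of empty sequence); B returns "ANDY" (zero moves, even count).
def Raises_gamingArray (arr : List Int) : Prop := arr = []
instance (arr : List Int) : Decidable (Raises_gamingArray arr) := by unfold Raises_gamingArray; infer_instance
def pvRaiseWitness_gamingArray : List Int := []
def pvRaiseWitnessOut_gamingArray : String := "ANDY"

def Spec_gamingArray (arr : List Int) (out : String) : Prop := out = gamingArray_alt arr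
instance (arr : List Int) (out : String) : Decidable (Spec_gamingArray arr out) := by unfold Spec_gamingArray; infer_instance

-- ===== CLAIM (what is proved, stated in full; the proofs are below) =====
def Claim_equal_gamingArray : Prop := ∀ (arr : List Int), Dom_gamingArray arr → Pre_gamingArray arr → Spec_gamingArray arr (gamingArray arr)
def Claim_raises_gamingArray : Prop := (∀ (arr : List Int), Dom_gamingArray arr → Raises_gamingArray arr → ¬ Pre_gamingArray arr) ∧ (Dom_gamingArray (pvRaiseWitness_gamingArray) ∧ Raises_gamingArray (pvRaiseWitness_gamingArray) ∧ gamingArray_alt (pvRaiseWitness_gamingArray) = pvRaiseWitnessOut_gamingArray)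

-- ===== LEMMAS AND PROOFS =====

-- number of strict left-to-right maxima of xs, given current best b
def lrCnt : List Int → Option Int → Int
  | [], _ => 0
  | x :: xs, none => 1 + lrCnt xs (some x)
  | x :: xs, some b => if x > b then 1 + lrCnt xs (some x) else lrCnt xs (some b)

-- running best along xs
def runB : List Int → Option Int → Option Int
  | [], b => b
  | x :: xs, none => runB xs (some x)
  | x :: xs, some b => if x > b then runB xs (some x) else runB xs (some b)

theorem fold_eq_lrCnt (xs : List Int) : ∀ (c : Int) (b : Option Int),
    (xs.foldl altStep (c, b)).1 = c + lrCnt xs b := by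
  induction xs with
  | nil => intro c b; simp [lrCnt]
  | cons x xs ih =>
    intro c b
    cases b with
    | none => simp [altStep, lrCnt, ih]; ring
    | some b0 =>
      by_cases h : x > b0 <;> simp [altStep, lrCnt, h, ih] <;> ring

theorem lrCnt_append (xs ys : List Int) : ∀ b,
    lrCnt (xs ++ ys) b = lrCnt xs b + lrCnt ys (runB xs b) := by
  induction xs with
  | nil => intro b; simp [lrCnt, runB]
  | cons x xs ih =>
    intro b
    cases b with
    | none => simp [lrCnt, runB, ih]; ring
    | some b0 =>
      by_cases h : x > b0 <;> simp [lrCnt, runB, h, ih] <;> ring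

theorem lrCnt_zero_of_le (k : Int) (xs : List Int) (h : ∀ x ∈ xs, x ≤ k) :
    lrCnt xs (some k) = 0 := by
  induction xs with
  | nil => simp [lrCnt]
  | cons x xs ih =>
    have hx : x ≤ k := h x (by simp)
    have : ¬ x > k := by omega
    simp [lrCnt, this]
    exact ih (fun y hy => h y (by simp [hy]))

theorem runB_lt (k : Int) (xs : List Int) (h : ∀ x ∈ xs, x < k) : ∀ (b : Option Int),
    (b = none ∨ ∃ b0, b = some b0 ∧ b0 < k) →
    (runB xs b = none ∨ ∃ b', runB xs b = some b' ∧ b' < k) := by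
  induction xs with
  | nil => intro b hb; simpa [runB] using hb
  | cons x xs ih =>
    intro b hb
    have hx : x < k := h x (by simp)
    have htail : ∀ y ∈ xs, y < k := fun y hy => h y (by simp [hy])
    rcases hb with rfl | ⟨b0, rfl, hb0⟩
    · exact ih htail (some x) (Or.inr ⟨x, rfl, hx⟩)
    · by_cases hgt : x > b0
      · simpa [runB, hgt] using ih htail (some x) (Or.inr ⟨x, rfl, hx⟩)
      · simpa [runB, hgt] using ih htail (some b0) (Or.inr ⟨b0, rfl, hb0⟩)

-- crux: one truncation step removes exactly one prefix maximum (the last one)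
theorem lrCnt_step (pre suf : List Int) (k : Int)
    (hpre : ∀ x ∈ pre, x < k) (hsuf : ∀ x ∈ suf, x ≤ k) :
    lrCnt (pre ++ k :: suf) none = lrCnt pre none + 1 := by
  rw [lrCnt_append]
  have hb := runB_lt k pre hpre none (Or.inl rfl)
  have hz := lrCnt_zero_of_le k suf hsuf
  rcases hb with hb | ⟨b', hb, hb'⟩
  · rw [hb]; simp [lrCnt, hz]
  · rw [hb]; have : k > b' := hb'
    simp [lrCnt, this, hz]

theorem go_eq (n : Nat) : ∀ (arr : List Int), arr.length ≤ n → arr ≠ [] → ∀ (i : Int),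
    gamingArrayGo arr i = if (i + lrCnt arr none) % 2 == 1 then "BOB" else "ANDY" := by
  induction n with
  | zero => intro arr hlen hne i; cases arr <;> simp_all
  | succ n ih =>
    intro arr hlen hne i
    rcases hmx : PySem.List.max? arr (fun y => y) with _ | k
    · exact absurd ((PySem.List.max?_eq_none_iff _ _).mp hmx) hne
    have hmem : k ∈ arr := PySem.List.max?_mem hmx
    have hmax : ∀ y ∈ arr, y ≤ k := by
      intro y hy; simpa using PySem.List.max?_isMax hmx y hy
    rcases hidx : PySem.List.index? arr k with _ | kidx
    · exact absurd ((PySem.List.index?_eq_none_iff _ _).mp hidx) (by simpa using hmem)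
    rcases (PySem.List.index?_eq_some_iff _ _ _).mp hidx with ⟨pre, suf, heq, hlenp, hnot⟩
    have hpre : ∀ x ∈ pre, x < k := by
      intro x hx
      have hle : x ≤ k := hmax x (by simp [heq, hx])
      have : x ≠ k := fun h => hnot (h ▸ hx)
      omega
    have hsuf : ∀ x ∈ suf, x ≤ k := fun x hx => hmax x (by simp [heq, hx])
    have hslice : PySem.List.slice arr none (some (kidx : Int)) = pre := by
      rw [PySem.List.slice_to_natCast, heq, ← hlenp]
      simp
    have hcnt : lrCnt arr none = lrCnt pre none + 1 := by
      rw [heq]; exact lrCnt_step pre suf k hpre hsuf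
    rw [gamingArrayGo, hmx]
    split
    case _ h0 => cases h0
    case _ k2 h0 =>
      injection h0 with h0; subst h0
      split
      case _ h2 => rw [hidx] at h2; cases h2
      case _ kidx2 h2 =>
      rw [hidx] at h2
      injection h2 with h2; subst h2
      simp only [hslice]
      by_cases hpn : pre = []
      · subst hpn
        have h1 : lrCnt arr none = 1 := by simp [hcnt, lrCnt]
        rw [h1]
        by_cases hpar : i % 2 == 0
        · have hi : i % 2 = 0 := by simpa using hpar
          have hi1 : (i + 1) % 2 = 1 := by omega
          simp [hpar, hi1]
        · have hi : i % 2 = 1 := by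
            have := Int.emod_two_eq i
            simp at hpar; omega
          have hi1 : (i + 1) % 2 = 0 := by omega
          simp [hpar, hi1]
      · have hlp : pre.length ≤ n := by
          have : arr.length = pre.length + suf.length + 1 := by simp [heq]; omega
          omega
        have hrec := ih pre hlp hpn (i + 1)
        have harith : i + 1 + lrCnt pre none = i + lrCnt arr none := by rw [hcnt]; ring
        rw [harith] at hrec
        have hnonzero : ¬ pre.length = 0 := by simpa using hpn
        by_cases hpar : i % 2 == 0 <;> simp [hpar, hnonzero, hrec]

-- ===== VERDICT (by name: the statement is the Claim_ definition above) =====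
theorem gamingArray_spec : Claim_equal_gamingArray := by
  intro arr _ hpre
  unfold Spec_gamingArray gamingArray gamingArray_alt
  rw [go_eq arr.length arr le_rfl hpre 0, fold_eq_lrCnt]

def gamingArray_raises : Claim_raises_gamingArray := by
  unfold Claim_raises_gamingArray
  exact ⟨fun arr _ h => by simp [Raises_gamingArray] at h; simp [Pre_gamingArray, h], by decide⟩
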